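-- pv_equiv track=rewrite | github.com/Guno327/nixcfg | tmp.py | ptr_ip
-- ===== SOURCE A (Python) =====
-- def ptr_ip(ip):
--     result = ""
--     working = ""
--     for c in reversed(ip):
--         if c == ".":
--             result += working
--             result += "."
--             working = ""
--         else:
--             working = c + working
--
--     result += working + ".in-addr.arpa.ghov.net"
--     return result
-- ===== SOURCE B (Python) =====
-- def ptr_ip(ip):
--     return ".".join(reversed(ip.split("."))) + ".in-addr.arpa.ghov.net"
-- ===== Notes on version B (the rewrite author's own statement) =====
-- stated objective: faster
-- what changed: Replaces the character-level reversed loop with its manual per-octet buffer and repeated string concatenation by token-level split on dots, reverse, join, plus the literal suffix.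
import Mathlib
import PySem

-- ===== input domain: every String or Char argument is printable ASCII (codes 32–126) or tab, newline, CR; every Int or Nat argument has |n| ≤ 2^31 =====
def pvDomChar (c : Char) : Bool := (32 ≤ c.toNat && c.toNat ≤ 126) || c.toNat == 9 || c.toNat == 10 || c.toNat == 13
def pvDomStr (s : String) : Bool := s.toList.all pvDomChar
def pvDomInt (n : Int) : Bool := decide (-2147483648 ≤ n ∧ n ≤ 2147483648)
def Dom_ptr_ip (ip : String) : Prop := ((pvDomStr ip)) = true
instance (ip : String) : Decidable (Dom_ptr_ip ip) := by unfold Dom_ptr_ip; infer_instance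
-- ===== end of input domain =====

-- B replaces A's character-level reversed loop (manual per-octet buffer) by split('.') / reverse / join; same return value, no side effects.

-- ===== PORT A =====
-- the loop 'for c in reversed(ip)' over state (result, working); strings as List Char (Lean's String ops are kernel-opaque)
def ptrLoopA : List Char → List Char × List Char → List Char × List Char
  | [], st => st
  | c :: rest, (result, working) =>
      if c = '.' then ptrLoopA rest (result ++ working ++ ['.'], [])
      else ptrLoopA rest (result, c :: working)

def ptr_ip (ip : String) : String :=
  String.ofList ((ptrLoopA ip.toList.reverse ([], [])).1
                 ++ (ptrLoopA ip.toList.reverse ([], [])).2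
                 ++ ".in-addr.arpa.ghov.net".toList)

-- ===== PORT B =====
def ptr_ip_alt (ip : String) : String :=
  String.ofList (PySem.Chars.join ['.'] ((PySem.Chars.splitOn ip.toList ['.']).reverse)
             ++ ".in-addr.arpa.ghov.net".toList)

-- ===== PRECONDITION & SPEC =====
def Spec_ptr_ip (ip : String) (out : String) : Prop := out = ptr_ip_alt ip
instance (ip : String) (out : String) : Decidable (Spec_ptr_ip ip out) := by unfold Spec_ptr_ip; infer_instance

-- ===== CLAIM (what is proved, stated in full; the proofs are below) =====
def Claim_equal_ptr_ip : Prop := ∀ (ip : String), Dom_ptr_ip ip → Spec_ptr_ip ip (ptr_ip ip)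

-- ===== LEMMAS AND PROOFS =====

-- chronological split of a char list on '.', with an accumulator for the current (reversed) piece
def spAux : List Char → List Char → List (List Char)
  | [], cur => [cur.reverse]
  | c :: rest, cur => if c = '.' then cur.reverse :: spAux rest [] else spAux rest (c :: cur)

lemma spAux_ne_nil (l cur : List Char) : spAux l cur ≠ [] := by
  induction l generalizing cur with
  | nil => simp [spAux]
  | cons c rest ih => simp only [spAux]; split_ifs <;> simp [ih]

-- PySem.Chars.splitOn with single-char sep '.' equals spAux
lemma splitOn_go_eq (fuel : Nat) (l cur : List Char) (acc : List (List Char))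
    (h : l.length < fuel) :
    PySem.Chars.splitOn.go ['.'] fuel l cur acc = acc.reverse ++ spAux l cur := by
  induction fuel generalizing l cur acc with
  | zero => omega
  | succ fuel ih =>
    cases l with
    | nil => simp [PySem.Chars.splitOn.go, spAux]
    | cons c rest =>
      simp only [PySem.Chars.splitOn.go, spAux, List.isPrefixOf]
      by_cases hc : c = '.'
      · subst hc
        simp only [BEq.rfl, Bool.true_and, if_pos]
        have hd : List.drop ['.'].length ('.' :: rest) = rest := rfl
        rw [hd, ih rest [] (cur.reverse :: acc) (by simpa using Nat.lt_of_succ_lt_succ h)]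
        simp
      · rw [if_neg (by simp [beq_iff_eq]; intro h'; exact (hc h'.symm).elim)]
        rw [ih rest (c :: cur) acc (by simpa using Nat.lt_of_succ_lt_succ h)]
        simp [hc]

lemma splitOn_eq_spAux (l : List Char) :
    PySem.Chars.splitOn l ['.'] = spAux l [] := by
  have := splitOn_go_eq (l.length + 1) l [] [] (by omega)
  simpa [PySem.Chars.splitOn] using this

-- a nonzero accumulator only prepends (reversed) onto the first piece
lemma spAux_cur (t : List Char) (cur : List Char) :
    spAux t cur = (cur.reverse ++ (spAux t []).headI) :: (spAux t []).tail := by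
  induction t generalizing cur with
  | nil => simp [spAux]
  | cons d r ih =>
    by_cases hd : d = '.'
    · subst hd; simp [spAux]
    · simp only [spAux, if_neg hd]
      rw [ih (d :: cur), ih [d]]
      simp

-- join over snoc
lemma join_snoc (ps : List (List Char)) (a : List Char) (h : ps ≠ []) :
    PySem.Chars.join ['.'] (ps ++ [a]) = PySem.Chars.join ['.'] ps ++ '.' :: a := by
  induction ps with
  | nil => exact absurd rfl h
  | cons p ps ih =>
    cases ps with
    | nil => simp [PySem.Chars.join_cons_cons, PySem.Chars.join_singleton]
    | cons q qs =>
      have h2 := ih (by simp)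
      simp only [List.cons_append] at h2 ⊢
      rw [PySem.Chars.join_cons_cons, h2, PySem.Chars.join_cons_cons]
      simp

-- joining the reversed pieces = flushed tail part ++ head piece
lemma join_rev_eq (ps : List (List Char)) (h : ps ≠ []) :
    PySem.Chars.join ['.'] ps.reverse =
      (if ps.tail = [] then []
       else PySem.Chars.join ['.'] ps.tail.reverse ++ ['.']) ++ ps.headI := by
  obtain ⟨p, qs, rfl⟩ := List.exists_cons_of_ne_nil h
  cases qs with
  | nil => simp [PySem.Chars.join_singleton]
  | cons q rs =>
    rw [List.reverse_cons, join_snoc _ p (by simp)]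
    simp

-- ptrLoopA is a left fold: it distributes over append
lemma ptrLoopA_append (xs ys : List Char) (st : List Char × List Char) :
    ptrLoopA (xs ++ ys) st = ptrLoopA ys (ptrLoopA xs st) := by
  induction xs generalizing st with
  | nil => rfl
  | cons x xs ih =>
    obtain ⟨r, w⟩ := st
    rw [List.cons_append]
    show (if x = '.' then ptrLoopA (xs ++ ys) (r ++ w ++ ['.'], []) else ptrLoopA (xs ++ ys) (r, x :: w)) =
      ptrLoopA ys (if x = '.' then ptrLoopA xs (r ++ w ++ ['.'], []) else ptrLoopA xs (r, x :: w))
    split_ifs <;> exact ih _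

-- the invariant: after A's loop over l.reverse, working = first piece of l, result = the flushed rest
lemma loopA_invariant (l : List Char) :
    ptrLoopA l.reverse ([], []) =
      ((if (spAux l []).tail = [] then []
        else PySem.Chars.join ['.'] (spAux l []).tail.reverse ++ ['.']),
       (spAux l []).headI) := by
  induction l with
  | nil => simp [ptrLoopA, spAux]
  | cons c t ih =>
    rw [List.reverse_cons, ptrLoopA_append, ih]
    by_cases hc : c = '.'
    · subst hc
      simp only [ptrLoopA, spAux, reduceIte, List.reverse_nil, List.tail_cons, List.headI_cons]
      rw [if_neg (spAux_ne_nil t []), join_rev_eq (spAux t []) (spAux_ne_nil t [])]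
    · simp only [ptrLoopA, spAux, if_neg hc]
      rw [spAux_cur t [c]]
      simp

lemma lists_eq (l : List Char) :
    (ptrLoopA l.reverse ([], [])).1 ++ (ptrLoopA l.reverse ([], [])).2 =
      PySem.Chars.join ['.'] ((spAux l []).reverse) := by
  rw [loopA_invariant, join_rev_eq (spAux l []) (spAux_ne_nil l [])]

-- ===== VERDICT (by name: the statement is the Claim_ definition above) =====
theorem ptr_ip_spec : Claim_equal_ptr_ip := by
  intro ip _
  show ptr_ip ip = ptr_ip_alt ip
  unfold ptr_ip ptr_ip_alt
  rw [splitOn_eq_spAux, lists_eq]
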